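-- pv_equiv track=rewrite | github.com/ArefPython/TeametobotGit | avg_checkins.py | assemble_message
-- ===== SOURCE A (Python) =====
-- from typing import Dict, Iterable, List, Optional, Sequence, Set, Tuple
--
-- TELEGRAM_SOFT_LIMIT = 3900  # keep well below hard 4096 cap
--
-- PERSIAN_DIGIT_TABLE = str.maketrans("0123456789", "۰۱۲۳۴۵۶۷۸۹")
--
-- def to_persian_digits(text: str) -> str:
--     """Replace ASCII digits with Persian digits."""
--     return text.translate(PERSIAN_DIGIT_TABLE)
--
-- def assemble_message(
--     header: str,
--     score_lines: List[str],
--     suffix_lines: List[str],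
--     hidden_count: int,
--     use_persian: bool,
--     excluded_users_line: Optional[str],
-- ) -> str:
--     """Combine all pieces into a single message within Telegram size limits."""
--     prefix_lines = [header]
--     if excluded_users_line:
--         prefix_lines.append(excluded_users_line)
--     prefix_lines.append("")
--
--     trimmed_scores = list(score_lines)
--     total_hidden = hidden_count
--     while trimmed_scores and len("\n".join(prefix_lines + trimmed_scores + suffix_lines)) > TELEGRAM_SOFT_LIMIT:
--         trimmed_scores.pop()
--         total_hidden += 1
--
--     lines = prefix_lines + trimmed_scores
--     if total_hidden > 0:
--         more_line = f"... (+{total_hidden} more)"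
--         if use_persian:
--             more_line = to_persian_digits(more_line)
--         lines.append(more_line)
--
--     if suffix_lines:
--         if lines and lines[-1] != "" and suffix_lines[0] != "":
--             lines.append("")
--         lines.extend(suffix_lines)
--
--     combined = "\n".join(lines)
--     if len(combined) <= TELEGRAM_SOFT_LIMIT:
--         return combined
--
--     # Fallback: trim suffix lines if still too long.
--     trimmed_suffix = list(suffix_lines)
--     while trimmed_suffix and len("\n".join(prefix_lines + trimmed_scores + trimmed_suffix)) > TELEGRAM_SOFT_LIMIT:
--         trimmed_suffix.pop()
--     lines = prefix_lines + trimmed_scores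
--     if total_hidden > 0:
--         more_line = f"... (+{total_hidden} more)"
--         if use_persian:
--             more_line = to_persian_digits(more_line)
--         lines.append(more_line)
--     lines.extend(trimmed_suffix)
--     combined = "\n".join(lines)
--     if len(combined) > TELEGRAM_SOFT_LIMIT:
--         combined = combined[: TELEGRAM_SOFT_LIMIT - 1]
--     return combined
-- ===== SOURCE B (Python) =====
-- from typing import List, Optional
--
-- TELEGRAM_SOFT_LIMIT = 3900
--
-- PERSIAN_DIGIT_TABLE = str.maketrans("0123456789", "۰۱۲۳۴۵۶۷۸۹")
--
--
-- def to_persian_digits(text: str) -> str: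
--     return text.translate(PERSIAN_DIGIT_TABLE)
--
--
-- def _fit_count(lines: List[str], budget: int) -> int:
--     """Largest k such that the first k lines (each costing len+1 joined chars)
--     fit in `budget`; single forward pass over a running budget."""
--     k = 0
--     for ln in lines:
--         c = len(ln) + 1
--         if c > budget:
--             break
--         budget -= c
--         k += 1
--     return k
--
--
-- def assemble_message(
--     header: str,
--     score_lines: List[str],
--     suffix_lines: List[str],
--     hidden_count: int,
--     use_persian: bool,
--     excluded_users_line: Optional[str],
-- ) -> str:
--     prefix_lines = [header]
--     if excluded_users_line:
--         prefix_lines.append(excluded_users_line)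
--     prefix_lines.append("")
--
--     fixed = sum(len(l) + 1 for l in prefix_lines)
--     suffix_cost = sum(len(l) + 1 for l in suffix_lines)
--
--     # joined length of prefix + scores[:k] + suffix == fixed + (cost of k scores) + suffix_cost - 1
--     k = _fit_count(score_lines, TELEGRAM_SOFT_LIMIT - (fixed + suffix_cost - 1))
--     trimmed_scores = score_lines[:k]
--     total_hidden = hidden_count + (len(score_lines) - k)
--
--     lines = prefix_lines + trimmed_scores
--     if total_hidden > 0:
--         more_line = f"... (+{total_hidden} more)"
--         if use_persian:
--             more_line = to_persian_digits(more_line)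
--         lines.append(more_line)
--
--     if suffix_lines:
--         if lines and lines[-1] != "" and suffix_lines[0] != "":
--             lines.append("")
--         lines.extend(suffix_lines)
--
--     combined = "\n".join(lines)
--     if len(combined) <= TELEGRAM_SOFT_LIMIT:
--         return combined
--
--     # Fallback: keep only the suffix lines that fit after prefix + kept scores.
--     score_cost = sum(len(l) + 1 for l in trimmed_scores)
--     m = _fit_count(suffix_lines, TELEGRAM_SOFT_LIMIT - (fixed + score_cost - 1))
--     lines = prefix_lines + trimmed_scores
--     if total_hidden > 0:
--         more_line = f"... (+{total_hidden} more)"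
--         if use_persian:
--             more_line = to_persian_digits(more_line)
--         lines.append(more_line)
--     lines.extend(suffix_lines[:m])
--     combined = "\n".join(lines)
--     if len(combined) > TELEGRAM_SOFT_LIMIT:
--         combined = combined[: TELEGRAM_SOFT_LIMIT - 1]
--     return combined
-- ===== Notes on version B (the rewrite author's own statement) =====
-- stated objective: faster
-- what changed: Instead of repeatedly re-joining all lines and popping one score/suffix line per iteration (quadratic in total characters), B computes each line's joined cost (len+1) once and finds the cutoff with a single running-budget pass, then slices the kept prefix.
import Mathlib
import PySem

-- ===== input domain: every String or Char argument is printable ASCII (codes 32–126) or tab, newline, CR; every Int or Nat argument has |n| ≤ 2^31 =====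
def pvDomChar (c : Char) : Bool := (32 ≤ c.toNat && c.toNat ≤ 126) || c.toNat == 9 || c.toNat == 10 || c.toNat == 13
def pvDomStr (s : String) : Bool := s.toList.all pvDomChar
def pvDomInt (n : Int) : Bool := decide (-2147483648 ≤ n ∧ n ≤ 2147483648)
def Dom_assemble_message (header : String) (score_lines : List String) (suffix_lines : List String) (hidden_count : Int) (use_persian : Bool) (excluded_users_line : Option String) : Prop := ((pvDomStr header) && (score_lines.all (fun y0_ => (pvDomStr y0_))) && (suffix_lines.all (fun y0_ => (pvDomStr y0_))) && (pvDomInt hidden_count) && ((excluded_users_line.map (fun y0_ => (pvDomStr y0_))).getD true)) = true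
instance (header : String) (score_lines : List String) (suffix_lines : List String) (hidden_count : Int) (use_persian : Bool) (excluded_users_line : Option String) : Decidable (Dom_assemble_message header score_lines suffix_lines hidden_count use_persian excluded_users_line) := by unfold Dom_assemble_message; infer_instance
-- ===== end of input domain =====

-- ===== PORT A =====
-- B changes A's trimming loops (re-join everything, pop one line, repeat — quadratic in characters)
-- into a single running-budget pass over per-line costs; objective: faster (asymptotic).
-- Shared module context: to_persian_digits and the f-string "... (+N more)".
def pvPersianChar (c : Char) : Char :=
  if 48 ≤ c.toNat ∧ c.toNat ≤ 57 then Char.ofNat (1776 + (c.toNat - 48)) else c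

def pvToPersianDigits (s : String) : String := String.ofList (s.toList.map pvPersianChar)

def pvMoreLine (h : Int) (use_persian : Bool) : String :=
  let m := String.ofList ("... (+".toList ++ PySem.Int.toChars h ++ " more)".toList)
  if use_persian then pvToPersianDigits m else m

-- prefix_lines = [header] (+ excluded_users_line if truthy) + [""]
def pvPrefixLines (header : String) (excluded_users_line : Option String) : List String :=
  match excluded_users_line with
  | some s => if s = "" then [header, ""] else [header, s, ""]
  | none => [header, ""]

-- len("\n".join(lines))
def pvJoinLen (lines : List String) : Int := PySem.Str.len (PySem.Str.join "\n" lines)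

-- A's first while loop: pop scores from the end while the joined message is too long;
-- returns (trimmed_scores, number of pops).
def pvTrimScoresA (pre suf : List String) (scores : List String) : List String × Nat :=
  if h : scores ≠ [] ∧ pvJoinLen (pre ++ scores ++ suf) > 3900 then
    let r := pvTrimScoresA pre suf scores.dropLast
    (r.1, r.2 + 1)
  else (scores, 0)
termination_by scores.length
decreasing_by
  simp only [List.length_dropLast]
  have := List.length_pos_of_ne_nil h.1
  omega

-- A's fallback while loop: pop suffix lines from the end while still too long.
def pvTrimSuffixA (base : List String) (suf : List String) : List String :=
  if h : suf ≠ [] ∧ pvJoinLen (base ++ suf) > 3900 then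
    pvTrimSuffixA base suf.dropLast
  else suf
termination_by suf.length
decreasing_by
  simp only [List.length_dropLast]
  have := List.length_pos_of_ne_nil h.1
  omega

def assemble_message (header : String) (score_lines : List String) (suffix_lines : List String) (hidden_count : Int) (use_persian : Bool) (excluded_users_line : Option String) : String :=
  let prefix_lines := pvPrefixLines header excluded_users_line
  let r := pvTrimScoresA prefix_lines suffix_lines score_lines
  let trimmed_scores := r.1
  let total_hidden := hidden_count + (r.2 : Int)
  let lines := prefix_lines ++ trimmed_scores
  let lines := if total_hidden > 0 then lines ++ [pvMoreLine total_hidden use_persian] else lines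
  let lines := if suffix_lines ≠ [] then
      (if lines ≠ [] ∧ lines.getLast? ≠ some "" ∧ suffix_lines.head? ≠ some "" then lines ++ [""] else lines)
        ++ suffix_lines
    else lines
  let combined := PySem.Str.join "\n" lines
  if PySem.Str.len combined ≤ 3900 then combined
  else
    let trimmed_suffix := pvTrimSuffixA (prefix_lines ++ trimmed_scores) suffix_lines
    let lines2 := prefix_lines ++ trimmed_scores
    let lines2 := if total_hidden > 0 then lines2 ++ [pvMoreLine total_hidden use_persian] else lines2
    let lines2 := lines2 ++ trimmed_suffix
    let combined2 := PySem.Str.join "\n" lines2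
    if PySem.Str.len combined2 > 3900 then PySem.Str.slice combined2 none (some 3899) else combined2

-- ===== PORT B =====
-- cost of a line inside a "\n"-join: its length plus one separator
def pvCost (s : String) : Int := PySem.Str.len s + 1

-- B's _fit_count: largest k such that the first k lines fit in the running budget.
def pvFitCount : List String → Int → Nat
  | [], _ => 0
  | l :: rest, budget =>
    let c := pvCost l
    if c > budget then 0 else pvFitCount rest (budget - c) + 1

def assemble_message_alt (header : String) (score_lines : List String) (suffix_lines : List String) (hidden_count : Int) (use_persian : Bool) (excluded_users_line : Option String) : String :=
  let prefix_lines := pvPrefixLines header excluded_users_line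
  let fixed := (prefix_lines.map pvCost).sum
  let suffix_cost := (suffix_lines.map pvCost).sum
  let k := pvFitCount score_lines (3900 - (fixed + suffix_cost - 1))
  let trimmed_scores := score_lines.take k
  let total_hidden := hidden_count + ((score_lines.length : Int) - (k : Int))
  let lines := prefix_lines ++ trimmed_scores
  let lines := if total_hidden > 0 then lines ++ [pvMoreLine total_hidden use_persian] else lines
  let lines := if suffix_lines ≠ [] then
      (if lines ≠ [] ∧ lines.getLast? ≠ some "" ∧ suffix_lines.head? ≠ some "" then lines ++ [""] else lines)
        ++ suffix_lines
    else lines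
  let combined := PySem.Str.join "\n" lines
  if PySem.Str.len combined ≤ 3900 then combined
  else
    let score_cost := (trimmed_scores.map pvCost).sum
    let m := pvFitCount suffix_lines (3900 - (fixed + score_cost - 1))
    let trimmed_suffix := suffix_lines.take m
    let lines2 := prefix_lines ++ trimmed_scores
    let lines2 := if total_hidden > 0 then lines2 ++ [pvMoreLine total_hidden use_persian] else lines2
    let lines2 := lines2 ++ trimmed_suffix
    let combined2 := PySem.Str.join "\n" lines2
    if PySem.Str.len combined2 > 3900 then PySem.Str.slice combined2 none (some 3899) else combined2

-- ===== PRECONDITION & SPEC =====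
def Spec_assemble_message (header : String) (score_lines : List String) (suffix_lines : List String) (hidden_count : Int) (use_persian : Bool) (excluded_users_line : Option String) (out : String) : Prop := out = assemble_message_alt header score_lines suffix_lines hidden_count use_persian excluded_users_line
instance (header : String) (score_lines : List String) (suffix_lines : List String) (hidden_count : Int) (use_persian : Bool) (excluded_users_line : Option String) (out : String) : Decidable (Spec_assemble_message header score_lines suffix_lines hidden_count use_persian excluded_users_line out) := by unfold Spec_assemble_message; infer_instance

-- ===== CLAIM (what is proved, stated in full; the proofs are below) =====
def Claim_equal_assemble_message : Prop := ∀ (header : String) (score_lines : List String) (suffix_lines : List String) (hidden_count : Int) (use_persian : Bool) (excluded_users_line : Option String), Dom_assemble_message header score_lines suffix_lines hidden_count use_persian excluded_users_line → Spec_assemble_message header score_lines suffix_lines hidden_count use_persian excluded_users_line (assemble_message header score_lines suffix_lines hidden_count use_persian excluded_users_line)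

-- ===== LEMMAS AND PROOFS =====

theorem pvJoinLen_cons (p : String) (ps : List String) :
    pvJoinLen (p :: ps) = ((p :: ps).map pvCost).sum - 1 := by
  induction ps generalizing p with
  | nil =>
    simp [pvJoinLen, pvCost, PySem.Str.len_eq, PySem.Str.toList_join, PySem.Chars.join_singleton]
  | cons q ps ih =>
    have h := ih q
    simp only [pvJoinLen, PySem.Str.len_eq, PySem.Str.toList_join, List.map_cons] at h ⊢
    rw [PySem.Chars.join_cons_cons, List.length_append, List.length_append]
    have hn : ("\n" : String).toList.length = 1 := rfl
    rw [hn]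
    simp only [List.sum_cons, pvCost, PySem.Str.len_eq] at h ⊢
    push_cast at h ⊢
    omega

theorem pvJoinLen_ne_nil (lines : List String) (h : lines ≠ []) :
    pvJoinLen lines = ((lines.map pvCost).sum) - 1 := by
  cases lines with
  | nil => exact absurd rfl h
  | cons p ps => exact pvJoinLen_cons p ps

theorem pvCost_pos (s : String) : 1 ≤ pvCost s := by
  simp only [pvCost, PySem.Str.len_eq]
  omega

theorem pvCost_sum_nonneg (ls : List String) : 0 ≤ (ls.map pvCost).sum := by
  apply List.sum_nonneg
  intro x hx
  obtain ⟨s, _, rfl⟩ := List.mem_map.1 hx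
  linarith [pvCost_pos s]

theorem pvFitCount_le_length (ls : List String) (b : Int) : pvFitCount ls b ≤ ls.length := by
  induction ls generalizing b with
  | nil => simp [pvFitCount]
  | cons l rest ih =>
    simp only [pvFitCount, List.length_cons]
    split
    · omega
    · have := ih (b - pvCost l)
      omega

theorem pvFitCount_of_fits (ls : List String) (b : Int) (h : (ls.map pvCost).sum ≤ b) :
    pvFitCount ls b = ls.length := by
  induction ls generalizing b with
  | nil => simp [pvFitCount]
  | cons l rest ih =>
    simp only [List.map_cons, List.sum_cons] at h
    have hrest := pvCost_sum_nonneg rest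
    simp only [pvFitCount, List.length_cons]
    rw [if_neg (by omega)]
    rw [ih (b - pvCost l) (by omega)]

theorem pvFitCount_concat (ls : List String) (y : String) (b : Int)
    (h : ((ls ++ [y]).map pvCost).sum > b) :
    pvFitCount (ls ++ [y]) b = pvFitCount ls b := by
  induction ls generalizing b with
  | nil =>
    simp only [List.nil_append, List.map_cons, List.map_nil, List.sum_cons, List.sum_nil] at h
    simp only [pvFitCount, List.nil_append]
    rw [if_pos (by omega)]
  | cons l rest ih =>
    have hsum : (((l :: rest) ++ [y]).map pvCost).sum = pvCost l + ((rest ++ [y]).map pvCost).sum := by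
      simp
    rw [hsum] at h
    show pvFitCount (l :: (rest ++ [y])) b = pvFitCount (l :: rest) b
    simp only [pvFitCount]
    split
    · rfl
    · rw [ih (b - pvCost l) (by omega)]

theorem pvTrimScoresA_eq (pre suf : List String) (hpre : pre ≠ []) (scores : List String) :
    pvTrimScoresA pre suf scores =
      (scores.take (pvFitCount scores (3900 - ((pre.map pvCost).sum + (suf.map pvCost).sum - 1))),
       scores.length - pvFitCount scores (3900 - ((pre.map pvCost).sum + (suf.map pvCost).sum - 1))) := by
  induction scores using List.reverseRecOn with
  | nil =>
    rw [pvTrimScoresA]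
    simp [pvFitCount]
  | append_singleton ys y ih =>
    have hne : (ys ++ [y] : List String) ≠ [] := by simp
    have hjoin : pvJoinLen (pre ++ (ys ++ [y]) ++ suf) =
        (pre.map pvCost).sum + ((ys ++ [y]).map pvCost).sum + (suf.map pvCost).sum - 1 := by
      rw [pvJoinLen_ne_nil _ (by simp [hpre])]
      simp [List.map_append, List.sum_append]
      ring
    by_cases hfit : ((ys ++ [y]).map pvCost).sum ≤ 3900 - ((pre.map pvCost).sum + (suf.map pvCost).sum - 1)
    · rw [pvTrimScoresA]
      rw [dif_neg (by
        intro hc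
        rw [hjoin] at hc
        omega)]
      rw [pvFitCount_of_fits _ _ hfit]
      simp
    · rw [not_le] at hfit
      rw [pvTrimScoresA]
      rw [dif_pos ⟨hne, by rw [hjoin]; omega⟩]
      rw [List.dropLast_concat, ih]
      have hcc := pvFitCount_concat ys y
        (3900 - ((pre.map pvCost).sum + (suf.map pvCost).sum - 1)) (by omega)
      rw [hcc]
      have hle := pvFitCount_le_length ys (3900 - ((pre.map pvCost).sum + (suf.map pvCost).sum - 1))
      simp only [Prod.mk.injEq]
      refine ⟨?_, ?_⟩
      · rw [List.take_append_of_le_length hle]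
      · simp only [List.length_append, List.length_cons, List.length_nil]
        omega

theorem pvTrimSuffixA_eq (base : List String) (hbase : base ≠ []) (suf : List String) :
    pvTrimSuffixA base suf = suf.take (pvFitCount suf (3900 - ((base.map pvCost).sum - 1))) := by
  induction suf using List.reverseRecOn with
  | nil =>
    rw [pvTrimSuffixA]
    simp [pvFitCount]
  | append_singleton ys y ih =>
    have hne : (ys ++ [y] : List String) ≠ [] := by simp
    have hjoin : pvJoinLen (base ++ (ys ++ [y])) =
        (base.map pvCost).sum + ((ys ++ [y]).map pvCost).sum - 1 := by
      rw [pvJoinLen_ne_nil _ (by simp [hbase])]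
      simp [List.map_append, List.sum_append]
    by_cases hfit : ((ys ++ [y]).map pvCost).sum ≤ 3900 - ((base.map pvCost).sum - 1)
    · rw [pvTrimSuffixA]
      rw [dif_neg (by
        intro hc
        rw [hjoin] at hc
        omega)]
      rw [pvFitCount_of_fits _ _ hfit]
      simp
    · rw [not_le] at hfit
      rw [pvTrimSuffixA]
      rw [dif_pos ⟨hne, by rw [hjoin]; omega⟩]
      rw [List.dropLast_concat, ih]
      have hcc := pvFitCount_concat ys y (3900 - ((base.map pvCost).sum - 1)) (by omega)
      rw [hcc]
      rw [List.take_append_of_le_length (pvFitCount_le_length ys _)]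

theorem pvPrefixLines_ne_nil (header : String) (exc : Option String) :
    pvPrefixLines header exc ≠ [] := by
  cases exc with
  | none => simp [pvPrefixLines]
  | some s => by_cases h : s = "" <;> simp [pvPrefixLines, h]

-- ===== VERDICT (by name: the statement is the Claim_ definition above) =====
theorem assemble_message_spec : Claim_equal_assemble_message := by
  intro header score_lines suffix_lines hidden_count use_persian excluded_users_line _
  simp only [Spec_assemble_message, assemble_message, assemble_message_alt]
  have hpre := pvPrefixLines_ne_nil header excluded_users_line
  rw [pvTrimScoresA_eq _ _ hpre]
  set k := pvFitCount score_lines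
    (3900 - (((pvPrefixLines header excluded_users_line).map pvCost).sum + (suffix_lines.map pvCost).sum - 1)) with hk
  have hle : k ≤ score_lines.length := pvFitCount_le_length _ _
  have hcast : ((score_lines.length - k : Nat) : Int) = (score_lines.length : Int) - (k : Int) := by
    omega
  rw [hcast]
  rw [pvTrimSuffixA_eq _ (by simp [hpre])]
  rw [List.map_append, List.sum_append]
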